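-- pv_equiv track=rewrite | github.com/Molecular-Biophysics-Database/mbdb-search | src/prettier_names.py | find_duplicate_names
-- ===== SOURCE A (Python) =====
-- from typing import List, Dict
--
-- def find_duplicate_names(data) -> Dict[str, List[str]]:
--     duplicate_names = {}
--
--     # Scan through the data to identify duplicate pretty names
--     for item in data:
--         pretty_name = item["pretty_name"]
--
--         # Check if the pretty_name has already been seen
--         if pretty_name not in duplicate_names:
--             duplicate_names[pretty_name] = []
--
--         duplicate_names[pretty_name] += [item["field_path"]]
--
--     return {k: v for k, v in duplicate_names.items() if len(v) > 1}
-- ===== SOURCE B (Python) =====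
-- def find_duplicate_names(data):
--     # Pass 1: count occurrences of each pretty_name.
--     counts = {}
--     for item in data:
--         pn = item["pretty_name"]
--         counts[pn] = counts.get(pn, 0) + 1
--     # Pass 2: collect field_paths only for names known to be duplicated.
--     result = {}
--     for item in data:
--         pn = item["pretty_name"]
--         if counts[pn] > 1:
--             result.setdefault(pn, []).append(item["field_path"])
--     return result
-- ===== Notes on version B (the rewrite author's own statement) =====
-- stated objective: alternative
-- what changed: Instead of accumulating every group's field_paths and filtering the finished dict by group length, B first counts pretty_name occurrences and then builds the result in a second pass that only ever collects names whose count exceeds 1.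
import Mathlib
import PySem

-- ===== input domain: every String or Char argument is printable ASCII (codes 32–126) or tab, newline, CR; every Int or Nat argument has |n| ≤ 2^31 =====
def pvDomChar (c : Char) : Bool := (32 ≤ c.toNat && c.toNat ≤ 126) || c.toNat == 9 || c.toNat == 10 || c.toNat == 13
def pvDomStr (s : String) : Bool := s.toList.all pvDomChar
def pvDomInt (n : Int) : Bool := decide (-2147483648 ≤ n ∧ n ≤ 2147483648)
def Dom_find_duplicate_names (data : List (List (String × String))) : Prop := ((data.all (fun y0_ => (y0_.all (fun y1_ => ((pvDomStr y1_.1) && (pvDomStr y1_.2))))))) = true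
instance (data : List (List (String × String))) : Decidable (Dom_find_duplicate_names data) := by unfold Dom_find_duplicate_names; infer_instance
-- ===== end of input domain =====

-- B replaces A's accumulate-all-groups-then-filter-by-length with a counting pass followed by a
-- second pass that collects field_paths only for pretty_names whose count exceeds 1 (objective: alternative).

-- item["pretty_name"] / item["field_path"]: first-match lookup; the KeyError (none) case is excluded by Pre_.
def pvPN (item : List (String × String)) : String :=
  ((PySem.Dict.mk item).get? "pretty_name").getD ""

def pvFP (item : List (String × String)) : String :=
  ((PySem.Dict.mk item).get? "field_path").getD ""

-- ===== PORT A =====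
def find_duplicate_names (data : List (List (String × String))) : List (String × List String) :=
  let duplicate_names : PySem.Dict String (List String) :=
    data.foldl (fun d item =>
      let pretty_name := pvPN item
      -- if pretty_name not in duplicate_names: duplicate_names[pretty_name] = []
      let d := if d.contains pretty_name then d else d.insert pretty_name []
      -- duplicate_names[pretty_name] += [item["field_path"]]  (the key is present here, so modify's default is never used)
      d.modify pretty_name [] (fun v => v ++ [pvFP item])) PySem.Dict.empty
  -- {k: v for k, v in duplicate_names.items() if len(v) > 1}: the keys are already distinct,
  -- so this comprehension's dict is exactly the filtered items list
  duplicate_names.items.filter (fun kv => decide (kv.2.length > 1))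

-- ===== PORT B =====
def find_duplicate_names_alt (data : List (List (String × String))) : List (String × List String) :=
  let counts : PySem.Dict String Int :=
    data.foldl (fun c item =>
      c.insert (pvPN item) (c.getD (pvPN item) 0 + 1)) PySem.Dict.empty
  let result : PySem.Dict String (List String) :=
    data.foldl (fun r item =>
      let pretty_name := pvPN item
      if counts.getD pretty_name 0 > 1 then
        -- result.setdefault(pn, []).append(item["field_path"])
        (r.setdefault pretty_name []).modify pretty_name [] (fun v => v ++ [pvFP item])
      else r) PySem.Dict.empty
  result.items

-- ===== PRECONDITION & SPEC =====
-- Pre_: every item has both keys "pretty_name" and "field_path"; otherwise Python A raises KeyError.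
def Pre_find_duplicate_names (data : List (List (String × String))) : Prop :=
  ∀ item ∈ data, (PySem.Dict.mk item).contains "pretty_name" = true ∧
    (PySem.Dict.mk item).contains "field_path" = true
instance (data : List (List (String × String))) : Decidable (Pre_find_duplicate_names data) := by unfold Pre_find_duplicate_names; infer_instance

def pvWitness_find_duplicate_names : (List (List (String × String))) :=
  [[("pretty_name", "a"), ("field_path", "x")], [("pretty_name", "a"), ("field_path", "y")]]

def Spec_find_duplicate_names (data : List (List (String × String))) (out : List (String × List String)) : Prop := out = find_duplicate_names_alt data
instance (data : List (List (String × String))) (out : List (String × List String)) : Decidable (Spec_find_duplicate_names data out) := by unfold Spec_find_duplicate_names; infer_instance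

-- ===== CLAIM (what is proved, stated in full; the proofs are below) =====
def Claim_equal_find_duplicate_names : Prop := ∀ (data : List (List (String × String))), Dom_find_duplicate_names data → Pre_find_duplicate_names data → Spec_find_duplicate_names data (find_duplicate_names data)

-- ===== LEMMAS AND PROOFS =====

-- the common group-accumulating step both loops reduce to
def pvGstep (d : PySem.Dict String (List String)) (p : String × String) : PySem.Dict String (List String) :=
  d.modify p.1 [] (fun v => v ++ [p.2])

lemma pvInsert_modify (d : PySem.Dict String (List String)) (k : String) (f : List String → List String)
    (h : d.contains k = false) :
    (d.insert k []).modify k [] f = d.modify k [] f := by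
  unfold PySem.Dict.modify
  rw [PySem.Dict.insert_insert_self, PySem.Dict.getD_insert_self,
    PySem.Dict.getD_of_not_contains d ([] : List String) h]

lemma pvStepA (d : PySem.Dict String (List String)) (k v : String) :
    (if d.contains k then d else d.insert k []).modify k [] (fun l => l ++ [v]) =
      pvGstep d (k, v) := by
  by_cases h : d.contains k = true
  · simp [h, pvGstep]
  · simp only [Bool.not_eq_true] at h
    simp [h, pvGstep, pvInsert_modify _ _ _ h]

lemma pvStepB (d : PySem.Dict String (List String)) (k v : String) :
    (d.setdefault k []).modify k [] (fun l => l ++ [v]) = pvGstep d (k, v) := by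
  by_cases h : d.contains k = true
  · rw [PySem.Dict.setdefault_of_contains d ([] : List String) h]; rfl
  · simp only [Bool.not_eq_true] at h
    rw [PySem.Dict.setdefault_of_not_contains d ([] : List String) h]
    exact pvInsert_modify _ _ _ h

lemma pvOfListFilter (xs : List String) (p : String → Bool) :
    PySem.Set.ofList (xs.filter p) = (PySem.Set.ofList xs).filter p := by
  induction xs using List.reverseRecOn with
  | nil => rfl
  | append_singleton xs x ih =>
    rw [List.filter_append, PySem.Set.ofList_append_singleton, PySem.Set.add_eq_ite]
    by_cases hm : x ∈ xs
    · rw [if_pos ((PySem.Set.mem_ofList xs x).mpr hm)]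
      by_cases hp : p x = true
      · simp only [List.filter_cons, hp, if_pos, List.filter_nil]
        rw [PySem.Set.ofList_append_singleton, PySem.Set.add_of_mem, ih]
        exact (PySem.Set.mem_ofList _ x).mpr (List.mem_filter.mpr ⟨hm, hp⟩)
      · simp [hp, ih]
    · rw [if_neg (fun h => hm ((PySem.Set.mem_ofList xs x).mp h)), List.filter_append]
      by_cases hp : p x = true
      · simp only [List.filter_cons, hp, if_pos, List.filter_nil]
        rw [PySem.Set.ofList_append_singleton, PySem.Set.add_of_not_mem, ih]
        intro h
        exact hm (List.mem_filter.mp ((PySem.Set.mem_ofList _ x).mp h)).1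
      · simp [hp, ih]

-- the items of the group-accumulating fold, fully characterised
lemma pvGroupItems (L : List (String × String)) :
    (L.foldl pvGstep PySem.Dict.empty).items =
      (PySem.Set.ofList (L.map Prod.fst)).map
        (fun k => (k, (L.filter (fun p => p.1 == k)).map Prod.snd)) := by
  have hempty : (PySem.Dict.empty : PySem.Dict String (List String)).keys = [] := by
    simp [PySem.Dict.keys, PySem.Dict.empty]
  have hnd : (L.foldl pvGstep PySem.Dict.empty).keys.Nodup := by
    have := PySem.Dict.nodup_keys_foldl_modify_key (κ := String) (ν := List String) L Prod.fst []
      (fun _ p v => v ++ [p.2]) PySem.Dict.empty (by rw [hempty]; exact List.nodup_nil)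
    simpa [pvGstep] using this
  have hkeys : (L.foldl pvGstep PySem.Dict.empty).keys = PySem.Set.ofList (L.map Prod.fst) := by
    have := PySem.Dict.keys_foldl_modify_key (κ := String) (ν := List String) L Prod.fst []
      (fun _ p v => v ++ [p.2]) PySem.Dict.empty
    simpa [pvGstep, hempty, PySem.Set.update_nil_left] using this
  have hgetD : ∀ k, (L.foldl pvGstep PySem.Dict.empty).getD k [] =
      (L.filter (fun p => p.1 == k)).map Prod.snd := by
    intro k
    have := PySem.Dict.getD_foldl_modify_append L PySem.Dict.empty k
    simpa [pvGstep, PySem.Dict.getD_empty] using this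
  rw [PySem.Dict.items_eq_map_keys _ hnd ([] : List String), hkeys]
  exact List.map_congr_left (fun k _ => by rw [hgetD k])

-- the counting loop of B computes occurrence counts
lemma pvCounts (data : List (List (String × String))) (k : String) :
    (data.foldl (fun c item =>
      c.insert (pvPN item) (c.getD (pvPN item) 0 + 1)) PySem.Dict.empty).getD k 0 =
      ((data.map pvPN).count k : Int) := by
  have h : data.foldl (fun c item => c.insert (pvPN item) (c.getD (pvPN item) 0 + 1))
        (PySem.Dict.empty : PySem.Dict String Int)
      = (data.map pvPN).foldl (fun c x => c.insert x (c.getD x 0 + 1)) PySem.Dict.empty :=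
    (List.foldl_map (f := pvPN)
      (g := fun (c : PySem.Dict String Int) x => c.insert x (c.getD x 0 + 1))).symm
  rw [h, PySem.Dict.getD_foldl_insert_add_one, PySem.Dict.getD_empty]
  simp

-- A's loop is the plain group fold over (pretty_name, field_path) pairs
lemma pvFoldG (data : List (List (String × String))) (d : PySem.Dict String (List String)) :
    data.foldl (fun d it => pvGstep d (pvPN it, pvFP it)) d =
      (data.map (fun it => (pvPN it, pvFP it))).foldl pvGstep d :=
  (List.foldl_map (f := fun it => (pvPN it, pvFP it)) (g := pvGstep)).symm

-- B's guarded loop is the group fold over the items passing the guard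
lemma pvFoldIf (c : String → Prop) [DecidablePred c] (data : List (List (String × String))) :
    ∀ d : PySem.Dict String (List String),
      data.foldl (fun r it => if c (pvPN it) then pvGstep r (pvPN it, pvFP it) else r) d =
      ((data.map (fun it => (pvPN it, pvFP it))).filter (fun p => decide (c p.1))).foldl pvGstep d := by
  induction data with
  | nil => intro d; rfl
  | cons it rest ih =>
    intro d
    simp only [List.foldl_cons, List.map_cons, List.filter_cons]
    by_cases hc : c (pvPN it)
    · simp only [hc, if_pos, decide_true, List.foldl_cons]
      exact ih _
    · simp only [hc, if_neg, decide_false, Bool.false_eq_true, not_false_iff]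
      exact ih _

-- the heart of the equivalence, stated on the pair list
lemma pvMainL (L : List (String × String)) :
    ((L.foldl pvGstep PySem.Dict.empty).items).filter (fun kv => decide (1 < kv.2.length)) =
      ((L.filter (fun p => decide (1 < (L.map Prod.fst).count p.1))).foldl pvGstep
        PySem.Dict.empty).items := by
  rw [pvGroupItems, pvGroupItems]
  have hkeys : (L.filter (fun p => decide (1 < (L.map Prod.fst).count p.1))).map Prod.fst =
      (L.map Prod.fst).filter (fun k => decide (1 < (L.map Prod.fst).count k)) := by
    rw [List.filter_map]; rfl
  rw [hkeys, pvOfListFilter, List.filter_map]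
  have hlen : ∀ k : String,
      ((L.filter (fun p => p.1 == k)).map Prod.snd).length = (L.map Prod.fst).count k := by
    intro k
    rw [List.length_map, List.count_eq_countP, List.countP_map, ← List.countP_eq_length_filter]
    rfl
  have hfilter : (PySem.Set.ofList (L.map Prod.fst)).filter
        ((fun kv : String × List String => decide (1 < kv.2.length)) ∘
          (fun k => (k, (L.filter (fun p => p.1 == k)).map Prod.snd))) =
      (PySem.Set.ofList (L.map Prod.fst)).filter (fun k => decide (1 < (L.map Prod.fst).count k)) :=
    List.filter_congr (fun k _ => by simp only [Function.comp_apply, hlen k])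
  rw [hfilter]
  refine List.map_congr_left (fun k hk => ?_)
  have hPk : decide (1 < (L.map Prod.fst).count k) = true := (List.mem_filter.mp hk).2
  have hgrp : (L.filter (fun p => decide (1 < (L.map Prod.fst).count p.1))).filter
        (fun p => p.1 == k) = L.filter (fun p => p.1 == k) := by
    rw [List.filter_filter]
    refine List.filter_congr (fun p _ => ?_)
    by_cases hpk : p.1 == k
    · have hpe : p.1 = k := by simpa using hpk
      simp [hpe, hPk]
    · simp [hpk]
  rw [hgrp]

-- ===== VERDICT (by name: the statement is the Claim_ definition above) =====
theorem find_duplicate_names_spec : Claim_equal_find_duplicate_names := by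
  intro data _ _
  unfold Spec_find_duplicate_names find_duplicate_names find_duplicate_names_alt
  simp only [pvStepA, pvStepB, gt_iff_lt]
  refine Eq.trans ?_ (congrArg PySem.Dict.items
    (pvFoldIf (fun k => 1 < (data.foldl (fun c item =>
      c.insert (pvPN item) (c.getD (pvPN item) 0 + 1))
        (PySem.Dict.empty : PySem.Dict String Int)).getD k 0)
      data PySem.Dict.empty)).symm
  refine Eq.trans (congrArg (fun t : PySem.Dict String (List String) =>
    t.items.filter (fun kv => decide (1 < kv.2.length))) (pvFoldG data PySem.Dict.empty)) ?_
  have hpred : (data.map (fun it => (pvPN it, pvFP it))).filter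
        (fun p => decide (1 < (data.foldl (fun c item =>
          c.insert (pvPN item) (c.getD (pvPN item) 0 + 1))
            (PySem.Dict.empty : PySem.Dict String Int)).getD p.1 0)) =
      (data.map (fun it => (pvPN it, pvFP it))).filter
        (fun p => decide (1 < ((data.map (fun it => (pvPN it, pvFP it))).map Prod.fst).count p.1)) := by
    refine List.filter_congr (fun p _ => ?_)
    simp only [pvCounts, Nat.one_lt_cast, List.map_map]
    simp [Function.comp_def]
  rw [hpred]
  exact pvMainL (data.map (fun it => (pvPN it, pvFP it)))
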